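/- GENERATED by farm/mkstatement.py from design/units.tsv (unit `codebook_decode_deinterleave_repeat.1`) and the assertions of Vorbis/Spec/Codebook/Deint.lean — do not edit.
   THE STATEMENT of the proof unit `codebook_decode_deinterleave_repeat.1`: segment 1 of `codebook_decode_deinterleave_repeat` (34 instructions; entries 0x10dbc0;
   exits 0x10dc9e,0x10de09; ranges 0x10dbc0-0x10dc3c)
   takes each of its entry assertions to one of its exit assertions (`Vorbis.Spec.Deint.Claim1`), given the contracts of its callees.
   What the names mean: Vorbis/Spec/Basic.lean (the shared hypotheses), Vorbis/Spec/Codebook/Deint.lean (the assertions). The theorem to prove: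
   `theorem codebook_decode_deinterleave_repeat_1_ok : Vorbis.Spec.codebook_decode_deinterleave_repeat_1.Statement`. -/
import Vorbis.Spec.Codebook.Deint
import Vorbis.Spec.Leaves
namespace Vorbis.Spec.codebook_decode_deinterleave_repeat_1
open X86 X86.User Asan

/-- The statement of unit `codebook_decode_deinterleave_repeat.1`. -/
def Statement : Prop :=
  ∀ (Lay : Layout) (_hLay : Lay.hi = 0x1000000) (μ : Microarch) (_hμ : UserX.MicroOK μ) (u₀ : State)
    (_hcode : HasCodeNat Lay u₀ Vorbis.L.codebook_decode_deinterleave_repeat.entry Vorbis.Code.code_codebook_decode_deinterleave_repeat.nat Vorbis.L.codebook_decode_deinterleave_repeat.size)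
    (_h_asan_load4_noabort : Asan.SmallCheck Lay μ Vorbis.WayInv (Vorbis.CodeOK u₀) [.rax, .rcx, .rdx] 4 Vorbis.L.__asan_load4_noabort.entry)
    (_h_asan_load1_noabort : Asan.SmallCheck Lay μ Vorbis.WayInv (Vorbis.CodeOK u₀) [.rax, .rdx] 1 Vorbis.L.__asan_load1_noabort.entry)
    (_h_error : ∀ (others : List Obj) (frames : List (Nat × FrameLayout)), Calls Lay μ Vorbis.WayInv (Vorbis.conv u₀) Vorbis.L.error.entry (Vorbis.Spec.error.spec others frames)),
    Vorbis.Spec.Deint.Claim1 Lay μ u₀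

end Vorbis.Spec.codebook_decode_deinterleave_repeat_1
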